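-- pv_equiv track=rewrite | github.com/Dipeshshah007/Design-Analysis-of-Algorithms-Projects- | Solution 1.py | pseudoCode
-- ===== SOURCE A (Python) =====
-- def pseudoCode(n):
--     j = 2
--     Sum = 0
--     a = list(range(n+1))
--     b = list(range(n+1))
--     while j < n:
--         k = j
--         while k < n:
--             Sum += a[j] * b[k]  # actual operation
--             k = k * k
--         j = 2 * j
--     return Sum
-- ===== SOURCE B (Python) =====
-- def pseudoCode(n):
--     def doublings(j):
--         # [j, 2j, 4j, ...] while below n
--         return [] if j >= n else [j] + doublings(2 * j)
--
--     def squarings(k):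
--         # [k, k^2, k^4, ...] while below n
--         return [] if k >= n else [k] + squarings(k * k)
--
--     return sum(j * sum(squarings(j)) for j in doublings(2))
-- ===== Notes on version B (the rewrite author's own statement) =====
-- stated objective: faster
-- what changed: B drops A's O(n) construction of two identity lists and instead materialises the geometric index sequences (doublings of 2 and squaring towers) as small lists, summing each tower once and multiplying by j, instead of A's nested accumulator loops over a[j]*b[k].
import Mathlib
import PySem

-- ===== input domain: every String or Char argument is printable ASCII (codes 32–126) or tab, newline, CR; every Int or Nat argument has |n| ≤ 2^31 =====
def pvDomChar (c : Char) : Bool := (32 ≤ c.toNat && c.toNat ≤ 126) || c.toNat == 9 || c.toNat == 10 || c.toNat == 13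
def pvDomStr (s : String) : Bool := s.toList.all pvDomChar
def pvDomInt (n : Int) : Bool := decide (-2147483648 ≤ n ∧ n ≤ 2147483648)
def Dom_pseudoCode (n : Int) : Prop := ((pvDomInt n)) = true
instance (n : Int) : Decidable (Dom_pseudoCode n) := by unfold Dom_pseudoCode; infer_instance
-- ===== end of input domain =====

-- B drops A's O(n) identity-list construction and replaces the nested accumulator
-- loops by materialising the small geometric index lists and summing them
-- (objective: faster, asymptotic).

-- ===== PORT A =====
-- inner while loop: while k < n: Sum += a[j]*b[k]; k = k*k
-- indices j, k are always in range (2 ≤ j,k < n < len = n+1), so a[j]/b[k] never raise;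
-- pyGetD is exact here. hk carries the loop invariant 2 ≤ k, needed for termination (k < k*k).
def pseudoCodeInnerA (n : Int) (a b : List Int) (j : Int) (k Sum : Int) (hk : 2 ≤ k) : Int :=
  if _h : k < n then
    pseudoCodeInnerA n a b j (k * k) (Sum + PySem.List.pyGetD a j 0 * PySem.List.pyGetD b k 0)
      (by nlinarith)
  else Sum
termination_by (n - k).toNat
decreasing_by have : k < k * k := by nlinarith
              omega

-- outer while loop: while j < n: (inner); j = 2*j
def pseudoCodeOuterA (n : Int) (a b : List Int) (j Sum : Int) (hj : 2 ≤ j) : Int :=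
  if _h : j < n then
    pseudoCodeOuterA n a b (2 * j) (pseudoCodeInnerA n a b j j Sum hj) (by nlinarith)
  else Sum
termination_by (n - j).toNat
decreasing_by have : j < 2 * j := by nlinarith
              omega

def pseudoCode (n : Int) : Int :=
  let a := PySem.List.pyRange 0 (n + 1) 1   -- list(range(n+1))
  let b := PySem.List.pyRange 0 (n + 1) 1
  pseudoCodeOuterA n a b 2 0 (by norm_num)

-- ===== PORT B =====
-- Source B's doublings: [] if j >= n else [j] + doublings(2*j).
-- The extra '2 ≤ j' conjunct only makes the recursion total (in Source B j is always ≥ 2,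
-- starting at 2 and doubling); it changes no value reached from the call below.
def pvDoublings (n j : Int) : List Int :=
  if _h : 2 ≤ j ∧ j < n then j :: pvDoublings n (2 * j) else []
termination_by (n - j).toNat
decreasing_by have : j < 2 * j := by nlinarith [_h.1]
              omega

-- Source B's squarings: [] if k >= n else [k] + squarings(k*k); same totality guard.
def pvSquarings (n k : Int) : List Int :=
  if _h : 2 ≤ k ∧ k < n then k :: pvSquarings n (k * k) else []
termination_by (n - k).toNat
decreasing_by have : k < k * k := by nlinarith [_h.1]
              omega

-- Source B: sum(j * sum(squarings(j)) for j in doublings(2))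
def pseudoCode_alt (n : Int) : Int :=
  ((pvDoublings n 2).map (fun j => j * (pvSquarings n j).sum)).sum

-- ===== PRECONDITION & SPEC =====
def Spec_pseudoCode (n : Int) (out : Int) : Prop := out = pseudoCode_alt n
instance (n : Int) (out : Int) : Decidable (Spec_pseudoCode n out) := by unfold Spec_pseudoCode; infer_instance

-- ===== CLAIM (what is proved, stated in full; the proofs are below) =====
def Claim_equal_pseudoCode : Prop := ∀ (n : Int), Dom_pseudoCode n → Spec_pseudoCode n (pseudoCode n)

-- ===== LEMMAS AND PROOFS =====

lemma innerA_step (n : Int) (a b : List Int) (j k Sum : Int) (hk : 2 ≤ k) (h : k < n) :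
    pseudoCodeInnerA n a b j k Sum hk =
      pseudoCodeInnerA n a b j (k * k)
        (Sum + PySem.List.pyGetD a j 0 * PySem.List.pyGetD b k 0) (by nlinarith) := by
  conv_lhs => rw [pseudoCodeInnerA]
  simp only [h, dif_pos]

lemma innerA_stop (n : Int) (a b : List Int) (j k Sum : Int) (hk : 2 ≤ k) (h : ¬ k < n) :
    pseudoCodeInnerA n a b j k Sum hk = Sum := by
  conv_lhs => rw [pseudoCodeInnerA]
  simp only [h, dif_neg, not_false_iff]

lemma outerA_step (n : Int) (a b : List Int) (j Sum : Int) (hj : 2 ≤ j) (h : j < n) :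
    pseudoCodeOuterA n a b j Sum hj =
      pseudoCodeOuterA n a b (2 * j) (pseudoCodeInnerA n a b j j Sum hj) (by nlinarith) := by
  conv_lhs => rw [pseudoCodeOuterA]
  simp only [h, dif_pos]

lemma outerA_stop (n : Int) (a b : List Int) (j Sum : Int) (hj : 2 ≤ j) (h : ¬ j < n) :
    pseudoCodeOuterA n a b j Sum hj = Sum := by
  conv_lhs => rw [pseudoCodeOuterA]
  simp only [h, dif_neg, not_false_iff]

-- the identity lists read back their index
lemma pyGetD_range_id (n i : Int) (h0 : 0 ≤ i) (h1 : i < n + 1) :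
    PySem.List.pyGetD (PySem.List.pyRange 0 (n + 1) 1) i 0 = i := by
  rw [PySem.List.pyGetD_eq_getElem _ 0 h0
      (by rw [PySem.List.length_pyRange_one]; omega)]
  rw [PySem.List.getElem_pyRange_one]
  omega

lemma inner_eq (n j k Sum : Int) (hj2 : 2 ≤ j) (hjn : j < n) (hk : 2 ≤ k) :
    pseudoCodeInnerA n (PySem.List.pyRange 0 (n + 1) 1) (PySem.List.pyRange 0 (n + 1) 1)
      j k Sum hk = Sum + j * (pvSquarings n k).sum := by
  fun_induction pvSquarings n k generalizing Sum with
  | case1 k h ih =>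
    rw [innerA_step _ _ _ _ _ _ hk h.2, ih _ (by nlinarith [h.1]),
        pyGetD_range_id n j (by omega) (by omega),
        pyGetD_range_id n k (by omega) (by omega)]
    simp; ring
  | case2 k h =>
    rw [innerA_stop _ _ _ _ _ _ hk (by tauto)]
    simp

lemma outer_eq (n j Sum : Int) (hj : 2 ≤ j) :
    pseudoCodeOuterA n (PySem.List.pyRange 0 (n + 1) 1) (PySem.List.pyRange 0 (n + 1) 1)
      j Sum hj =
      Sum + ((pvDoublings n j).map (fun j' => j' * (pvSquarings n j').sum)).sum := by
  fun_induction pvDoublings n j generalizing Sum with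
  | case1 j h ih =>
    rw [outerA_step _ _ _ _ _ hj h.2, ih _ (by nlinarith [h.1]),
        inner_eq n j j Sum hj h.2 hj]
    simp; ring
  | case2 j h =>
    rw [outerA_stop _ _ _ _ _ hj (by tauto)]
    simp

-- ===== VERDICT (by name: the statement is the Claim_ definition above) =====
theorem pseudoCode_spec : Claim_equal_pseudoCode := by
  intro n _
  show pseudoCode n = pseudoCode_alt n
  unfold pseudoCode pseudoCode_alt
  rw [outer_eq]
  ring
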